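-- pv_equiv track=rewrite | github.com/EvelynLizbeth/Prueba | miniCondic.py | maximoDeSumaColumna
-- ===== SOURCE A (Python) =====
-- def maximoDeSumaColumna(M,f,c):
--     L=[]
--     for j in range(c):
--         suma=0
--         for i in range(f):
--             suma=suma+abs(M[i][j])
--
--         L.append(suma)
--
--     maximo=L[0]
--     for i in range(c):
--         if L[i]>maximo:
--             maximo=L[i]
--     return maximo
-- ===== SOURCE B (Python) =====
-- def maximoDeSumaColumna(M, f, c):
--     # Row-major single pass: all column sums accumulated in parallel, then max().
--     sums = [0] * c
--     for i in range(f):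
--         row = M[i]
--         sums = [s + abs(row[j]) for j, s in enumerate(sums)]
--     return max(sums)
-- ===== Notes on version B (the rewrite author's own statement) =====
-- stated objective: simpler
-- what changed: B scans the matrix once in row-major order, updating all c column totals in parallel with an enumerate comprehension, and takes the maximum with built-in max(), instead of A's column-major double loop that appends each column sum to a list and then re-scans that list with a manual running-maximum loop.
import Mathlib
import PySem

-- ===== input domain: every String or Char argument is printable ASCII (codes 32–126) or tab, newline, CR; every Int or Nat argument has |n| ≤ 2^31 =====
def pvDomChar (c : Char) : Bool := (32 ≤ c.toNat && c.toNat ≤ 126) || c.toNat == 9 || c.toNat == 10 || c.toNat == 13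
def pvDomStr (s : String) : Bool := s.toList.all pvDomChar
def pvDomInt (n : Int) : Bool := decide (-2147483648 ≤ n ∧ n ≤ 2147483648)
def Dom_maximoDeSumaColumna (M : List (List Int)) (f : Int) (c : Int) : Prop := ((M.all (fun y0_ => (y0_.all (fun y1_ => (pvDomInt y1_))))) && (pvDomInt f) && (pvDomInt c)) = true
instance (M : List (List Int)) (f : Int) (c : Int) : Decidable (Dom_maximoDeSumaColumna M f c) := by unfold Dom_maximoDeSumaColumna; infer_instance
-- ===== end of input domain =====

-- B replaces A's column-major double loop + separate running-maximum pass by one row-major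
-- accumulation of all column totals and built-in max(); objective: simpler. Equivalence is
-- about the return value on Pre_ (neither version mutates its arguments).

-- ===== PORT A =====
-- 'for j in range(c): L.append(...)' is ported as map over range(c); 'for i in range(c): if L[i] > maximo'
-- is ported as the same left-to-right scan of L (len(L) = c holds on every input, by construction of L).
def maximoDeSumaColumna (M : List (List Int)) (f : Int) (c : Int) : Int :=
  let L := (PySem.List.pyRange 0 c 1).map (fun j =>
      (PySem.List.pyRange 0 f 1).foldl
        (fun suma i => suma + |PySem.List.pyGetD (PySem.List.pyGetD M i []) j 0|) 0)
  let maximo := PySem.List.pyGetD L 0 0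
  L.foldl (fun maximo Li => if Li > maximo then Li else maximo) maximo

-- ===== PORT B =====
def maximoDeSumaColumna_alt (M : List (List Int)) (f : Int) (c : Int) : Int :=
  let sums := (PySem.List.pyRange 0 f 1).foldl
    (fun sums i =>
      let row := PySem.List.pyGetD M i []
      (PySem.List.enumerate sums 0).map (fun p => p.2 + |PySem.List.pyGetD row p.1 0|))
    (PySem.List.pyRepeat [0] c)
  (PySem.List.max? sums (fun x => x)).getD 0

-- ===== PRECONDITION & SPEC =====
-- Pre_ is exactly A's return domain: c ≥ 1 (else L[0] raises IndexError), the f rows that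
-- are visited exist, and each visited row has at least c entries.
def Pre_maximoDeSumaColumna (M : List (List Int)) (f : Int) (c : Int) : Prop :=
  1 ≤ c ∧ f ≤ (M.length : Int) ∧ ∀ row ∈ M.take f.toNat, c ≤ (row.length : Int)
instance (M : List (List Int)) (f : Int) (c : Int) : Decidable (Pre_maximoDeSumaColumna M f c) := by
  unfold Pre_maximoDeSumaColumna; infer_instance
def pvWitness_maximoDeSumaColumna : List (List Int) × Int × Int := ([[1, -2], [3, 4]], 2, 2)

def Spec_maximoDeSumaColumna (M : List (List Int)) (f : Int) (c : Int) (out : Int) : Prop := out = maximoDeSumaColumna_alt M f c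
instance (M : List (List Int)) (f : Int) (c : Int) (out : Int) : Decidable (Spec_maximoDeSumaColumna M f c out) := by unfold Spec_maximoDeSumaColumna; infer_instance

-- ===== CLAIM (what is proved, stated in full; the proofs are below) =====
def Claim_equal_maximoDeSumaColumna : Prop := ∀ (M : List (List Int)) (f : Int) (c : Int), Dom_maximoDeSumaColumna M f c → Pre_maximoDeSumaColumna M f c → Spec_maximoDeSumaColumna M f c (maximoDeSumaColumna M f c)

-- ===== LEMMAS AND PROOFS =====

-- B's row accumulation, described pointwise over the current sums list
theorem pvAlt_fold_eq (M : List (List Int)) (l : List Int) (sums : List Int) :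
    l.foldl (fun sums i =>
        (PySem.List.enumerate sums 0).map
          (fun p => p.2 + |PySem.List.pyGetD (PySem.List.pyGetD M i []) p.1 0|)) sums
      = (PySem.List.pyRange 0 (sums.length : Int) 1).map
          (fun j => PySem.List.pyGetD sums j 0 +
            l.foldl (fun s i => s + |PySem.List.pyGetD (PySem.List.pyGetD M i []) j 0|) 0) := by
  induction l generalizing sums with
  | nil =>
    simp only [List.foldl_nil]
    rw [show (fun j => PySem.List.pyGetD sums j 0 + (0:Int)) = (fun j => PySem.List.pyGetD sums j 0) from funext (fun j => by ring)]
    exact (PySem.List.map_pyGetD_pyRange_zero' sums 0).symm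
  | cons i t ih =>
    simp only [List.foldl_cons]
    rw [ih]
    have hstep : (PySem.List.enumerate sums 0).map
        (fun p => p.2 + |PySem.List.pyGetD (PySem.List.pyGetD M i []) p.1 0|)
        = (PySem.List.pyRange 0 (sums.length : Int) 1).map
            (fun j => PySem.List.pyGetD sums j 0 + |PySem.List.pyGetD (PySem.List.pyGetD M i []) j 0|) := by
      rw [PySem.List.enumerate_eq_map_pyRange sums (0:Int), List.map_map]
      rfl
    rw [hstep]
    have hlen : ((((PySem.List.pyRange 0 (sums.length : Int) 1).map
        (fun j => PySem.List.pyGetD sums j 0 + |PySem.List.pyGetD (PySem.List.pyGetD M i []) j 0|)).length : Int))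
        = (sums.length : Int) := by
      simp [PySem.List.length_pyRange_one]
    rw [hlen]
    refine List.map_congr_left (fun j hj => ?_)
    have hj' : 0 ≤ j ∧ j < (sums.length : Int) := (PySem.List.mem_pyRange_one).mp hj
    rw [PySem.List.pyGetD_map_pyRange_of_nonneg _ _ _ _ hj'.1 hj'.2]
    rw [PySem.List.foldl_add, PySem.List.foldl_add]
    ring

-- A's running-maximum loop is foldl max
theorem pvScan_eq_max (t : List Int) (x : Int) :
    t.foldl (fun m v => if v > m then v else m) x = t.foldl max x := by
  induction t generalizing x with
  | nil => rfl
  | cons v t ih =>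
    simp only [List.foldl_cons]
    rw [ih]
    congr 1
    rw [max_def]
    split_ifs <;> omega

theorem pvGetD_replicate (n : Nat) (j : Int) :
    PySem.List.pyGetD (List.replicate n (0:Int)) j 0 = 0 := by
  by_cases h : PySem.Raise.InRange (List.replicate n (0:Int)).length j
  · exact List.eq_of_mem_replicate (PySem.List.pyGetD_mem _ 0 h)
  · exact PySem.List.pyGetD_of_none _ _ _
      ((PySem.List.pyGet?_eq_none_iff _ _).mpr h)

-- ===== VERDICT (by name: the statement is the Claim_ definition above) =====
theorem maximoDeSumaColumna_spec : Claim_equal_maximoDeSumaColumna := by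
  intro M f c _hD hPre
  obtain ⟨hc, -, -⟩ := hPre
  unfold Spec_maximoDeSumaColumna maximoDeSumaColumna maximoDeSumaColumna_alt
  rw [PySem.List.pyRepeat_singleton, pvAlt_fold_eq]
  have hrep : ((List.replicate c.toNat (0:Int)).length : Int) = c := by
    simp; omega
  rw [hrep]
  have hsums : (PySem.List.pyRange 0 c 1).map
      (fun j => PySem.List.pyGetD (List.replicate c.toNat (0:Int)) j 0 +
        (PySem.List.pyRange 0 f 1).foldl
          (fun s i => s + |PySem.List.pyGetD (PySem.List.pyGetD M i []) j 0|) 0)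
      = (PySem.List.pyRange 0 c 1).map
          (fun j => (PySem.List.pyRange 0 f 1).foldl
            (fun suma i => suma + |PySem.List.pyGetD (PySem.List.pyGetD M i []) j 0|) 0) := by
    refine List.map_congr_left (fun j _ => ?_)
    rw [pvGetD_replicate, zero_add]
  rw [hsums]
  set L := (PySem.List.pyRange 0 c 1).map
      (fun j => (PySem.List.pyRange 0 f 1).foldl
        (fun suma i => suma + |PySem.List.pyGetD (PySem.List.pyGetD M i []) j 0|) 0) with hLdef
  have hLlen : (L.length : Int) = c := by
    simp [hLdef, PySem.List.length_pyRange_one]; omega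
  have hne : L ≠ [] := by
    intro h
    rw [h] at hLlen
    simp at hLlen
    omega
  obtain ⟨x, t, hxt⟩ := List.exists_cons_of_ne_nil hne
  rw [hxt]
  show (x :: t).foldl (fun m Li => if Li > m then Li else m) (PySem.List.pyGetD (x :: t) 0 0)
      = (PySem.List.max? (x :: t) (fun x => x)).getD 0
  rw [PySem.List.pyGetD_zero_cons, List.foldl_cons]
  have hx : (if x > x then x else x) = x := by omega
  rw [hx, pvScan_eq_max, PySem.List.max?_id_cons, Option.getD_some]
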